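-- pv_equiv track=rewrite | github.com/dvroom-dev/arc-agi-3-harness | scripts/score_run.py | _actions_by_completed_level
-- ===== SOURCE A (Python) =====
-- def _actions_by_completed_level(step_levels: list[int]) -> tuple[list[int], int]:
--     """Return (completed_level_actions, partial_next_level_actions)."""
--     completed_actions: list[int] = []
--     prev_completed = 0
--     cur_actions = 0
--     for lv_done in step_levels:
--         cur_actions += 1
--         if lv_done > prev_completed:
--             gains = lv_done - prev_completed
--             for _ in range(gains):
--                 completed_actions.append(cur_actions)
--                 cur_actions = 0
--                 prev_completed += 1
--     return completed_actions, cur_actions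
-- ===== SOURCE B (Python) =====
-- def _actions_by_completed_level(step_levels: list[int]) -> tuple[list[int], int]:
--     """Return (completed_level_actions, partial_next_level_actions)."""
--     n = len(step_levels)
--     prefix_max = []
--     m = 0
--     for lv in step_levels:
--         if lv > m:
--             m = lv
--         prefix_max.append(m)
--
--     def first_step_reaching(k):
--         # 1-based index of the first step whose running max reaches k (binary search,
--         # prefix_max is nondecreasing)
--         lo, hi = 0, n
--         while lo < hi:
--             mid = (lo + hi) // 2
--             if prefix_max[mid] >= k:
--                 hi = mid
--             else:
--                 lo = mid + 1
--         return lo + 1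
--
--     idxs = [0] + [first_step_reaching(k) for k in range(1, m + 1)]
--     counts = [idxs[k] - idxs[k - 1] for k in range(1, m + 1)]
--     return counts, n - idxs[m]
-- ===== Notes on version B (the rewrite author's own statement) =====
-- stated objective: alternative
-- what changed: B replaces A's single accumulating scan (running action counter reset inside an inner append loop) by a staged algorithm: one pass builds the prefix-maximum list, then each completed level's first step is found by binary search on that monotone list, and the per-level counts are consecutive differences of those indices.
import Mathlib
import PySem

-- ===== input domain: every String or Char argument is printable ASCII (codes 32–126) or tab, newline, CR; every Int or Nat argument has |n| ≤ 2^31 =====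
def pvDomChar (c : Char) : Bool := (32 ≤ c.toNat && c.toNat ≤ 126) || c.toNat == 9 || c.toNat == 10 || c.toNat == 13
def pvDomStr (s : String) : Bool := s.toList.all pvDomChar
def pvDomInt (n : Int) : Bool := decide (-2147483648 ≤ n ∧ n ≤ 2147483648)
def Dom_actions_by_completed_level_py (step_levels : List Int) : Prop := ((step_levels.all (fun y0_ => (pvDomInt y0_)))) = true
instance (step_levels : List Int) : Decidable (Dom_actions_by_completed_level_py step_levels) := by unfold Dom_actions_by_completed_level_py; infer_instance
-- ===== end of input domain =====

-- B replaces A's single accumulator pass by a staged algorithm: build the prefix-maximum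
-- list, then binary-search it for each level's first completion step; objective: alternative.

-- ===== PORT A =====
def innerA : Nat -> List Int -> Int -> Int -> List Int × Int × Int
  | 0, acc, cur, prev => (acc, cur, prev)
  | n+1, acc, cur, prev => innerA n (cur :: acc) 0 (prev + 1)

def goA : List Int -> List Int -> Int -> Int -> List Int × Int
  | [], acc, _, cur => (acc.reverse, cur)
  | lv :: rest, acc, prev, cur =>
    let cur := cur + 1
    if lv > prev then
      let r := innerA (lv - prev).toNat acc cur prev
      goA rest r.1 r.2.2 r.2.1
    else
      goA rest acc prev cur

-- accumulator kept reversed (cons instead of append) and reversed once at the end;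
-- same values appended in the same order as the Python
def actions_by_completed_level_py (step_levels : List Int) : List Int × Int :=
  goA step_levels [] 0 0

-- ===== PORT B =====
-- first pass of Source B: build the prefix-maximum list (kept reversed, reversed at the end)
-- together with the final maximum m
def prefLoopB : List Int -> Int -> List Int -> List Int × Int
  | [], m, acc => (acc.reverse, m)
  | lv :: rest, m, acc =>
    let m' := if lv > m then lv else m
    prefLoopB rest m' (m' :: acc)

-- Source B's hand-written binary search: first index in [lo,hi) whose prefix max is ≥ k
def bsearchB (pref : List Int) (k : Int) (lo hi : Nat) : Nat :=
  if lo < hi then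
    if k ≤ pref.getD ((lo + hi) / 2) 0 then bsearchB pref k lo ((lo + hi) / 2)
    else bsearchB pref k ((lo + hi) / 2 + 1) hi
  else lo
termination_by hi - lo
decreasing_by all_goals omega

def actions_by_completed_level_py_alt (step_levels : List Int) : List Int × Int :=
  let n := step_levels.length
  let pm := prefLoopB step_levels 0 []
  -- idxs = [0] + [first_step_reaching(k) for k in range(1, m+1)]  (j below is k-1)
  let idxs : List Int := 0 :: (List.range pm.2.toNat).map
      (fun (j : Nat) => ((bsearchB pm.1 ((j : Int) + 1) 0 n : Nat) : Int) + 1)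
  let counts := (List.range pm.2.toNat).map (fun j => idxs.getD (j + 1) 0 - idxs.getD j 0)
  (counts, (n : Int) - idxs.getD pm.2.toNat 0)

-- ===== PRECONDITION & SPEC =====
def Spec_actions_by_completed_level_py (step_levels : List Int) (out : List Int × Int) : Prop := out = actions_by_completed_level_py_alt step_levels
instance (step_levels : List Int) (out : List Int × Int) : Decidable (Spec_actions_by_completed_level_py step_levels out) := by unfold Spec_actions_by_completed_level_py; infer_instance

-- ===== CLAIM (what is proved, stated in full; the proofs are below) =====
def Claim_equal_actions_by_completed_level_py : Prop := ∀ (step_levels : List Int), Dom_actions_by_completed_level_py step_levels → Spec_actions_by_completed_level_py step_levels (actions_by_completed_level_py step_levels)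

-- ===== LEMMAS AND PROOFS =====

-- proof-side reference quantities: first 1-based step reaching level k, final max, prefix maxima
def fI (xs : List Int) (k : Int) : Nat := xs.findIdx (fun x => decide (k ≤ x))

def gI (xs : List Int) (k : Int) : Int := if k ≤ 0 then 0 else (fI xs k : Int) + 1

def mfin : List Int -> Int -> Int
  | [], m => m
  | a :: r, m => mfin r (if a > m then a else m)

def pfx : List Int -> Int -> List Int
  | [], _ => []
  | a :: r, m => (if a > m then a else m) :: pfx r (if a > m then a else m)

-- state transformer of A's loop
def stA : List Int -> List Int × Int × Int -> List Int × Int × Int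
  | [], s => s
  | lv :: rest, (acc, prev, cur) =>
    if lv > prev then
      let r := innerA (lv - prev).toNat acc (cur + 1) prev
      stA rest (r.1, r.2.2, r.2.1)
    else
      stA rest (acc, prev, cur + 1)

theorem goA_stA (xs : List Int) (acc : List Int) (prev cur : Int) :
    goA xs acc prev cur = ((stA xs (acc, prev, cur)).1.reverse, (stA xs (acc, prev, cur)).2.2) := by
  induction xs generalizing acc prev cur with
  | nil => simp [goA, stA]
  | cons lv rest ih =>
    simp only [goA, stA]
    split_ifs <;> exact ih _ _ _

theorem stA_append (xs ys : List Int) (s : List Int × Int × Int) :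
    stA (xs ++ ys) s = stA ys (stA xs s) := by
  induction xs generalizing s with
  | nil => simp [stA]
  | cons lv rest ih =>
    obtain ⟨acc, prev, cur⟩ := s
    simp only [List.cons_append, stA]
    split_ifs <;> exact ih _

theorem innerA_succ (n : Nat) (acc : List Int) (cur prev : Int) :
    innerA (n+1) acc cur prev = (List.replicate n 0 ++ cur :: acc, 0, prev + (n+1)) := by
  induction n generalizing acc cur prev with
  | zero => simp [innerA]
  | succ k ih =>
    show innerA (k+1) (cur :: acc) 0 (prev + 1) = _
    rw [ih]
    simp [List.replicate_succ']
    ring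

theorem mfin_ge (xs : List Int) (m : Int) : m ≤ mfin xs m := by
  induction xs generalizing m with
  | nil => simp [mfin]
  | cons a r ih =>
    simp only [mfin]
    split_ifs with h
    · exact le_trans (le_of_lt h) (ih a)
    · exact ih m

theorem mfin_append (xs ys : List Int) (m : Int) :
    mfin (xs ++ ys) m = mfin ys (mfin xs m) := by
  induction xs generalizing m with
  | nil => simp [mfin]
  | cons a r ih => simp only [List.cons_append, mfin]; exact ih _

theorem mem_le_mfin (xs : List Int) (m : Int) (x : Int) (hx : x ∈ xs) : x ≤ mfin xs m := by
  induction xs generalizing m with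
  | nil => simp at hx
  | cons a r ih =>
    simp only [mfin]
    rcases List.mem_cons.mp hx with rfl | hr
    · refine le_trans ?_ (mfin_ge r _)
      split_ifs with h <;> omega
    · exact ih _ hr

theorem mfin_mem_or (xs : List Int) (m : Int) : mfin xs m = m ∨ mfin xs m ∈ xs := by
  induction xs generalizing m with
  | nil => simp [mfin]
  | cons a r ih =>
    simp only [mfin]
    rcases ih (if a > m then a else m) with h | h
    · rw [h]; split_ifs with hc
      · right; simp
      · left; rfl
    · right; exact List.mem_cons_of_mem _ h

-- k is unreached in xs: no element is ≥ k
theorem fI_eq_length_of_gt (xs : List Int) (k : Int) (h : mfin xs 0 < k) :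
    fI xs k = xs.length := by
  rw [fI, List.findIdx_eq_length]
  intro x hx
  have := mem_le_mfin xs 0 x hx
  simp only [decide_eq_false_iff_not, not_le]
  omega

-- k is reached inside xs
theorem fI_lt_length_of_le (xs : List Int) (k : Int) (h1 : 0 < k) (h2 : k ≤ mfin xs 0) :
    fI xs k < xs.length := by
  rw [fI, List.findIdx_lt_length]
  rcases mfin_mem_or xs 0 with h | h
  · omega
  · exact ⟨mfin xs 0, h, by simpa using h2⟩

theorem prefLoopB_spec (xs : List Int) (m : Int) (acc : List Int) :
    prefLoopB xs m acc = (acc.reverse ++ pfx xs m, mfin xs m) := by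
  induction xs generalizing m acc with
  | nil => simp [prefLoopB, pfx, mfin]
  | cons a r ih =>
    simp only [prefLoopB, pfx, mfin]
    rw [ih]
    simp

theorem pfx_base_le (xs : List Int) (m : Int) (i : Nat) (hi : i < xs.length) :
    m ≤ (pfx xs m).getD i 0 := by
  induction xs generalizing m i with
  | nil => simp at hi
  | cons a r ih =>
    cases i with
    | zero => simp only [pfx, List.getD_cons_zero]; split_ifs <;> omega
    | succ j =>
      simp only [pfx, List.getD_cons_succ]
      have := ih (if a > m then a else m) j (by simpa using hi)
      split_ifs at this ⊢ <;> omega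

theorem pfx_ge_iff (xs : List Int) (m k : Int) (hk : m < k) (i : Nat) (hi : i < xs.length) :
    (k ≤ (pfx xs m).getD i 0) ↔ fI xs k ≤ i := by
  induction xs generalizing m i with
  | nil => simp at hi
  | cons a r ih =>
    cases i with
    | zero =>
      simp only [pfx, List.getD_cons_zero, fI, List.findIdx_cons]
      by_cases ha : k ≤ a
      · simp [ha]; split_ifs <;> omega
      · simp [ha, cond]
        split_ifs <;> omega
    | succ j =>
      simp only [pfx, List.getD_cons_succ, fI, List.findIdx_cons]
      by_cases ha : k ≤ a
      · simp only [ha, decide_true, cond_true]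
        constructor
        · intro _; omega
        · intro _
          calc k ≤ (if a > m then a else m) := by split_ifs <;> omega
            _ ≤ (pfx r (if a > m then a else m)).getD j 0 :=
              pfx_base_le _ _ j (by simpa using hi)
      · simp only [ha, decide_false, cond_false]
        have := ih (if a > m then a else m) (by split_ifs <;> omega) j (by simpa using hi)
        rw [fI] at this
        rw [this]
        omega

theorem bsearch_eq (pref : List Int) (k : Int) (t : Nat) :
    ∀ (d lo hi : Nat), hi - lo ≤ d → lo ≤ t → t ≤ hi →
    (∀ i, lo ≤ i → i < hi → ((k ≤ pref.getD i 0) ↔ t ≤ i)) →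
    bsearchB pref k lo hi = t := by
  intro d
  induction d with
  | zero =>
    intro lo hi hd h1 h2 _
    rw [bsearchB, if_neg (by omega)]
    omega
  | succ d ih =>
    intro lo hi hd h1 h2 hiff
    rw [bsearchB]
    by_cases hlt : lo < hi
    · rw [if_pos hlt]
      have hmid : lo ≤ (lo + hi) / 2 ∧ (lo + hi) / 2 < hi := by omega
      by_cases hc : k ≤ pref.getD ((lo + hi) / 2) 0
      · rw [if_pos hc]
        have ht : t ≤ (lo + hi) / 2 := (hiff _ hmid.1 hmid.2).mp hc
        exact ih lo _ (by omega) h1 ht (fun i h1' h2' => hiff i h1' (by omega))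
      · rw [if_neg hc]
        have ht : ¬ t ≤ (lo + hi) / 2 := fun h => hc ((hiff _ hmid.1 hmid.2).mpr h)
        exact ih _ hi (by omega) (by omega) h2 (fun i h1' h2' => hiff i (by omega) h2')
    · rw [if_neg hlt]; omega

-- gI of xs ++ [a]
theorem gI_append_le (xs : List Int) (a k : Int) (h1 : 0 < k) (h2 : k ≤ mfin xs 0) :
    gI (xs ++ [a]) k = gI xs k := by
  have hlt := fI_lt_length_of_le xs k h1 h2
  simp only [gI, if_neg (by omega : ¬ k ≤ 0), fI] at *
  rw [List.findIdx_append, if_pos hlt]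

theorem gI_append_new (xs : List Int) (a k : Int) (h1 : mfin xs 0 < k) (h2 : k ≤ a) :
    gI (xs ++ [a]) k = (xs.length : Int) + 1 := by
  have h0 : 0 < k := lt_of_le_of_lt (mfin_ge xs 0) h1
  have hn := fI_eq_length_of_gt xs k h1
  simp only [gI, if_neg (by omega : ¬ k ≤ 0), fI] at *
  rw [List.findIdx_append, if_neg (by omega), List.findIdx_cons]
  simp [h2, cond]

-- the central characterisation of A's loop state
theorem stA_spec (xs : List Int) :
    stA xs ([], 0, 0) =
      (((List.range (mfin xs 0).toNat).map
          (fun (j : Nat) => gI xs ((j : Int) + 1) - gI xs (j : Int))).reverse,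
       mfin xs 0,
       (xs.length : Int) - gI xs (mfin xs 0)) := by
  induction xs using List.reverseRecOn with
  | nil => simp [stA, mfin, gI]
  | append_singleton xs a ih =>
    rw [stA_append, ih]
    set M := mfin xs 0 with hM
    have hM0 : 0 ≤ M := mfin_ge xs 0
    have hMnew : mfin (xs ++ [a]) 0 = if a > M then a else M := by
      rw [mfin_append]; simp only [mfin]; rw [hM]
    simp only [stA]
    by_cases hc : a > M
    · rw [if_pos hc]
      have hd : (a - M).toNat = (a - M - 1).toNat + 1 := by omega
      rw [hd, innerA_succ]
      have hMa : mfin (xs ++ [a]) 0 = a := by rw [hMnew, if_pos hc]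
      have hsplit : a.toNat = M.toNat + ((a - M - 1).toNat + 1) := by omega
      have hmapold : ∀ j ∈ List.range M.toNat,
          gI (xs ++ [a]) ((j : Int) + 1) - gI (xs ++ [a]) (j : Int)
            = gI xs ((j : Int) + 1) - gI xs (j : Int) := by
        intro j hj
        rw [List.mem_range] at hj
        rw [gI_append_le xs a ((j : Int) + 1) (by omega) (by omega)]
        by_cases hz : (j : Int) ≤ 0
        · have hj0 : j = 0 := by omega
          subst hj0; simp [gI]
        · rw [gI_append_le xs a (j : Int) (by omega) (by omega)]
      have hgM : gI (xs ++ [a]) ((M.toNat : Nat) : Int) = gI xs M := by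
        by_cases hz : M ≤ 0
        · have h0 : M = 0 := by omega
          simp [h0, gI]
        · rw [show ((M.toNat : Nat) : Int) = M by omega]
          exact gI_append_le xs a M (by omega) (le_refl M)
      have hF : ∀ i : Nat, i ≤ (a - M - 1).toNat →
          gI (xs ++ [a]) (((M.toNat + i : Nat) : Int) + 1)
            - gI (xs ++ [a]) ((M.toNat + i : Nat) : Int)
            = if i = 0 then (xs.length : Int) + 1 - gI xs M else 0 := by
        intro i hi
        have hcast : ((M.toNat + i : Nat) : Int) = M + (i : Int) := by push_cast; omega
        rw [hcast,
            gI_append_new xs a (M + (i : Int) + 1) (by omega) (by omega)]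
        by_cases hi0 : i = 0
        · subst hi0
          rw [if_pos rfl]
          have : M + ((0 : Nat) : Int) = ((M.toNat : Nat) : Int) := by push_cast; omega
          rw [this, hgM]
        · rw [if_neg hi0,
              gI_append_new xs a (M + (i : Int)) (by omega) (by omega)]
          ring
      simp only [Prod.mk.injEq]
      refine ⟨?_, ?_, ?_⟩
      · -- accumulator component
        rw [hMa, hsplit, List.range_add, List.map_append, List.map_map,
            List.map_congr_left hmapold]
        have hblock :
            List.map ((fun (j : Nat) => gI (xs ++ [a]) ((j : Int) + 1)
                - gI (xs ++ [a]) (j : Int)) ∘ fun x => M.toNat + x)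
              (List.range ((a - M - 1).toNat + 1))
            = ((xs.length : Int) + 1 - gI xs M) :: List.replicate (a - M - 1).toNat 0 := by
          apply List.ext_getElem
          · simp
          · intro n h1 h2
            rw [List.length_map, List.length_range] at h1
            simp only [List.getElem_map, List.getElem_range, Function.comp_apply]
            rw [hF n (by omega)]
            cases n with
            | zero => simp
            | succ p =>
              rw [if_neg (by omega)]
              rw [List.getElem_cons_succ, List.getElem_replicate]
        rw [hblock]
        simp [List.reverse_append, List.append_assoc]
        ring
      · rw [hMa]; omega
      · rw [hMa, gI_append_new xs a a hc (le_refl a)]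
        simp [List.length_append]
    · rw [if_neg hc]
      have hMa : mfin (xs ++ [a]) 0 = M := by rw [hMnew, if_neg hc]
      rw [hMa]
      have hmapold : ∀ j ∈ List.range M.toNat,
          gI (xs ++ [a]) ((j : Int) + 1) - gI (xs ++ [a]) (j : Int)
            = gI xs ((j : Int) + 1) - gI xs (j : Int) := by
        intro j hj
        rw [List.mem_range] at hj
        rw [gI_append_le xs a ((j : Int) + 1) (by omega) (by omega)]
        by_cases hz : (j : Int) ≤ 0
        · have hj0 : j = 0 := by omega
          subst hj0; simp [gI]
        · rw [gI_append_le xs a (j : Int) (by omega) (by omega)]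
      rw [List.map_congr_left hmapold]
      simp only [Prod.mk.injEq]
      refine ⟨by trivial, by trivial, ?_⟩
      have hgM : gI (xs ++ [a]) M = gI xs M := by
        by_cases hz : M ≤ 0
        · have h0 : M = 0 := by omega
          simp [h0, gI]
        · exact gI_append_le xs a M (by omega) (le_refl M)
      rw [hgM]
      simp [List.length_append]
      ring

-- B's binary search computes fI on the prefix-max list
theorem bsearch_fI (xs : List Int) (k : Int) (hk : 0 < k) :
    bsearchB (pfx xs 0) k 0 xs.length = fI xs k := by
  apply bsearch_eq (pfx xs 0) k (fI xs k) xs.length 0 xs.length (by omega)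
    (Nat.zero_le _) List.findIdx_le_length
  intro i _ hi
  exact pfx_ge_iff xs 0 k hk i hi

-- B equals the same characterisation
theorem alt_spec (xs : List Int) :
    actions_by_completed_level_py_alt xs =
      ((List.range (mfin xs 0).toNat).map
          (fun (j : Nat) => gI xs ((j : Int) + 1) - gI xs (j : Int)),
       (xs.length : Int) - gI xs (mfin xs 0)) := by
  unfold actions_by_completed_level_py_alt
  rw [prefLoopB_spec]
  simp only [List.reverse_nil, List.nil_append]
  set M := mfin xs 0 with hM
  have hM0 : 0 ≤ M := mfin_ge xs 0
  set idxs : List Int := 0 :: (List.range M.toNat).map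
      (fun (j : Nat) => ((bsearchB (pfx xs 0) ((j : Int) + 1) 0 xs.length : Nat) : Int) + 1) with hidxs
  have hget : ∀ j : Nat, j ≤ M.toNat → idxs.getD j 0 = gI xs (j : Int) := by
    intro j hj
    cases j with
    | zero => simp [hidxs, gI]
    | succ i =>
      rw [hidxs, List.getD_cons_succ]
      have hlen : i < ((List.range M.toNat).map
          (fun (j : Nat) => ((bsearchB (pfx xs 0) ((j : Int) + 1) 0 xs.length : Nat) : Int) + 1)).length := by
        simp; omega
      rw [List.getD_eq_getElem _ _ hlen]
      simp only [List.getElem_map, List.getElem_range]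
      rw [bsearch_fI xs ((i : Int) + 1) (by omega)]
      rw [gI, if_neg (show ¬ (((i + 1 : Nat) : Int) ≤ 0) by omega)]
      push_cast
      ring
  simp only [Prod.mk.injEq]
  constructor
  · apply List.map_congr_left
    intro j hj
    rw [List.mem_range] at hj
    rw [hget (j + 1) (by omega), hget j (by omega)]
    push_cast
    ring
  · rw [hget M.toNat (le_refl _)]
    congr 2
    omega

-- ===== VERDICT (by name: the statement is the Claim_ definition above) =====
theorem actions_by_completed_level_py_spec : Claim_equal_actions_by_completed_level_py := by
  intro xs _
  unfold Spec_actions_by_completed_level_py actions_by_completed_level_py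
  rw [goA_stA, stA_spec, alt_spec]
  simp
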